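-- pv_equiv track=rewrite | github.com/ZacharyZhao55/ReqGen | req_gen_unilm/unilm/src/crf_project/exp/five_group/event_pre_stanza.py | deal_operation
-- ===== SOURCE A (Python) =====
-- def deal_operation(deal_sent, opList):
-- 	op_list = [0 for i in range(len(deal_sent))]
-- 	ops = opList.split('|')
-- 	for op in ops:
-- 		one_op = op.lower().split()
-- 		ll = len(one_op)
-- 		for j in range(len(deal_sent)):
-- 			if deal_sent[j:j+ll] == one_op:
-- 				m = j
-- 				while m <= j + ll - 1:
-- 					op_list[m] = 1
-- 					m += 1
-- 				break
-- 	return op_list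
-- ===== SOURCE B (Python) =====
-- def deal_operation(deal_sent, opList):
--     n = len(deal_sent)
--     pos = {}
--     for i, tok in enumerate(deal_sent):
--         pos.setdefault(tok, []).append(i)
--     intervals = []
--     for op in opList.split('|'):
--         toks = op.lower().split()
--         if toks:
--             for j in pos.get(toks[0], []):
--                 if deal_sent[j:j + len(toks)] == toks:
--                     intervals.append((j, j + len(toks)))
--                     break
--     return [1 if any(s <= i < e for (s, e) in intervals) else 0 for i in range(n)]
-- ===== Notes on version B (the rewrite author's own statement) =====
-- stated objective: alternative
-- what changed: Replaces A's per-op scan over every sentence position with in-place array marking by a token->positions index built once (each op only slice-checks candidate positions of its first token), collecting (start,end) intervals and emitting the 0/1 list in one final comprehension.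
import Mathlib
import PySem

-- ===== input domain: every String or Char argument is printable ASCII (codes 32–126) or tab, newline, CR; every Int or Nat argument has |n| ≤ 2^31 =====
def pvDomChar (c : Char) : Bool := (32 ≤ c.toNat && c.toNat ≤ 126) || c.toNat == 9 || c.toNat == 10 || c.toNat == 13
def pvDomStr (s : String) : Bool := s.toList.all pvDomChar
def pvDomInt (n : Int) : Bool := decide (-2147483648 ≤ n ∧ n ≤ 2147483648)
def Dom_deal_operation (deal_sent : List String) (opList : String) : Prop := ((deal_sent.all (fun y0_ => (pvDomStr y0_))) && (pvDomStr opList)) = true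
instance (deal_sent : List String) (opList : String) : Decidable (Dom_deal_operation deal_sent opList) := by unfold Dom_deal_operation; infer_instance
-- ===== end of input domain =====

-- B replaces A's per-op scan over every position and in-place marking with a token→positions
-- index built once (each op only slice-checks candidate positions of its first token),
-- collecting (start,end) intervals and emitting the 0/1 list in one final comprehension.

-- ===== PORT A =====
-- the inner 'while m <= j + ll - 1: op_list[m] = 1; m += 1' loop; indices are always in
-- range when A reaches it (a match at j implies j + ll ≤ len), so List.set is exact here
def aWhile (op_list : List Int) (m stop : Int) : List Int :=
  if m ≤ stop then aWhile (op_list.set m.toNat 1) (m + 1) stop else op_list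
termination_by (stop + 1 - m).toNat
decreasing_by omega

-- the 'for j in range(len(deal_sent)): if deal_sent[j:j+ll] == one_op: … break' loop
def aInner (deal_sent one_op : List String) (op_list : List Int) (js : List Int) : List Int :=
  match js with
  | [] => op_list
  | j :: rest =>
    if PySem.List.slice deal_sent (some j) (some (j + (one_op.length : Int))) = one_op then
      aWhile op_list j (j + (one_op.length : Int) - 1)
    else aInner deal_sent one_op op_list rest

def deal_operation (deal_sent : List String) (opList : String) : List Int :=
  let op_list := (PySem.List.pyRange 0 (deal_sent.length : Int) 1).map (fun _ => (0 : Int))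
  let ops := ((PySem.Str.split? opList "|").getD [])
  ops.foldl (fun op_list op =>
    let one_op := PySem.Str.split₀ (PySem.Str.lower op)
    aInner deal_sent one_op op_list (PySem.List.pyRange 0 (deal_sent.length : Int) 1)) op_list

-- ===== PORT B =====
-- 'for i, tok in enumerate(deal_sent): pos.setdefault(tok, []).append(i)'
def bPos (deal_sent : List String) : PySem.Dict String (List Int) :=
  (PySem.List.enumerate deal_sent 0).foldl
    (fun d p => d.modify p.2 [] (fun v => v ++ [p.1])) PySem.Dict.empty

-- 'for j in pos.get(toks[0], []): if deal_sent[j:j+len(toks)] == toks: … break'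
def bFind (deal_sent toks : List String) (cands : List Int) : Option (Int × Int) :=
  match cands with
  | [] => none
  | j :: rest =>
    if PySem.List.slice deal_sent (some j) (some (j + (toks.length : Int))) = toks then
      some (j, j + (toks.length : Int))
    else bFind deal_sent toks rest

def deal_operation_alt (deal_sent : List String) (opList : String) : List Int :=
  let pos := bPos deal_sent
  let intervals := (((PySem.Str.split? opList "|").getD [])).foldl (fun acc op =>
    let toks := PySem.Str.split₀ (PySem.Str.lower op)
    match toks with
    | [] => acc
    | t0 :: ts =>
      match bFind deal_sent (t0 :: ts) (pos.getD t0 []) with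
      | some iv => acc ++ [iv]
      | none => acc) ([] : List (Int × Int))
  (PySem.List.pyRange 0 (deal_sent.length : Int) 1).map
    (fun i => if intervals.any (fun iv => decide (iv.1 ≤ i ∧ i < iv.2)) then (1 : Int) else 0)

-- ===== PRECONDITION & SPEC =====
def Spec_deal_operation (deal_sent : List String) (opList : String) (out : List Int) : Prop := out = deal_operation_alt deal_sent opList
instance (deal_sent : List String) (opList : String) (out : List Int) : Decidable (Spec_deal_operation deal_sent opList out) := by unfold Spec_deal_operation; infer_instance

-- ===== CLAIM (what is proved, stated in full; the proofs are below) =====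
def Claim_equal_deal_operation : Prop := ∀ (deal_sent : List String) (opList : String), Dom_deal_operation deal_sent opList → Spec_deal_operation deal_sent opList (deal_operation deal_sent opList)

-- ===== LEMMAS AND PROOFS =====

-- the 0/1 indicator B's final comprehension computes
def indic (intervals : List (Int × Int)) (i : Int) : Int :=
  if intervals.any (fun iv => decide (iv.1 ≤ i ∧ i < iv.2)) then 1 else 0

theorem aWhile_getElem? (l : List Int) (m stop : Int) (h0 : 0 ≤ m) (i : Nat) :
    (aWhile l m stop)[i]? =
      if m ≤ (i : Int) ∧ (i : Int) ≤ stop ∧ i < l.length then some 1 else l[i]? := by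
  fun_induction aWhile l m stop with
  | case1 l m h ih =>
    rw [ih (by omega)]
    simp only [List.length_set, List.getElem?_set]
    by_cases hi : m.toNat = i
    · split_ifs <;> simp_all <;> omega
    · split_ifs <;> first | rfl | omega
  | case2 l m h =>
    rw [if_neg (by omega)]

theorem aInner_eq_find? (ds toks : List String) (l : List Int) (js : List Int) :
    aInner ds toks l js =
      match js.find? (fun j => decide (PySem.List.slice ds (some j) (some (j + (toks.length : Int))) = toks)) with
      | some j => aWhile l j (j + (toks.length : Int) - 1)
      | none => l := by
  induction js with
  | nil => rfl
  | cons j rest ih =>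
    simp only [aInner, List.find?]
    by_cases h : PySem.List.slice ds (some j) (some (j + (toks.length : Int))) = toks
    · simp [h]
    · simp [h, ih]

theorem bFind_eq_find? (ds toks : List String) (cands : List Int) :
    bFind ds toks cands =
      (cands.find? (fun j => decide (PySem.List.slice ds (some j) (some (j + (toks.length : Int))) = toks))).map
        (fun j => (j, j + (toks.length : Int))) := by
  induction cands with
  | nil => rfl
  | cons j rest ih =>
    simp only [bFind, List.find?]
    by_cases h : PySem.List.slice ds (some j) (some (j + (toks.length : Int))) = toks
    · simp [h]
    · simp [h, ih]

theorem bPos_getD (ds : List String) (t : String) :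
    (bPos ds).getD t [] =
      (PySem.List.pyRange 0 (ds.length : Int) 1).filter
        (fun j => PySem.List.pyGetD ds j "" == t) := by
  have build : ∀ (l : List (Int × String)) (d : PySem.Dict String (List Int)),
      (l.foldl (fun d p => d.modify p.2 [] (fun v => v ++ [p.1])) d).getD t []
        = d.getD t [] ++ (l.filter (fun p => p.2 == t)).map (·.1) := by
    intro l
    induction l with
    | nil => simp
    | cons hd tl ih =>
      intro d
      simp only [List.foldl_cons, List.filter_cons]
      rw [ih, PySem.Dict.getD_modify]
      by_cases h : t = hd.2
      · simp [h]
      · simp only [if_neg h]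
        rw [if_neg (by simp only [beq_iff_eq]; exact fun hh => h hh.symm)]
  unfold bPos
  rw [build, PySem.List.enumerate_eq_map_pyRange ds "", List.filter_map, List.map_map]
  simp [Function.comp_def]

theorem find?_filter_of_imp (l : List Int) (p q : Int → Bool)
    (h : ∀ j ∈ l, p j = true → q j = true) :
    (l.filter q).find? p = l.find? p := by
  induction l with
  | nil => rfl
  | cons j rest ih =>
    have ih' := ih (fun x hx hp => h x (List.mem_cons_of_mem _ hx) hp)
    by_cases hq : q j = true
    · simp only [List.filter_cons, hq, if_pos, List.find?]
      cases hp : p j <;> simp [ih']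
    · have hp : p j = false := by
        cases hp : p j
        · rfl
        · exact absurd (h j (List.mem_cons_self) hp) (by simp [hq])
      simp [hq, List.find?, hp, ih']

theorem slice_match_facts (ds : List String) (t0 : String) (ts : List String) (j : Int)
    (hj0 : 0 ≤ j) (hjn : j < (ds.length : Int))
    (hs : PySem.List.slice ds (some j) (some (j + (((t0 :: ts).length : Nat) : Int))) = t0 :: ts) :
    j + (((t0 :: ts).length : Nat) : Int) ≤ (ds.length : Int) ∧
      (PySem.List.pyGetD ds j "" == t0) = true := by
  rw [PySem.List.slice_toNat ds hj0 (by simp; omega)] at hs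
  have hlen := congrArg List.length hs
  simp only [List.length_take, List.length_drop, List.length_cons] at hlen
  have hj : (j + ((ts.length + 1 : Nat) : Int)).toNat - j.toNat = ts.length + 1 := by omega
  have hub : j + (((t0 :: ts).length : Nat) : Int) ≤ (ds.length : Int) := by
    simp only [List.length_cons] at *
    omega
  refine ⟨hub, ?_⟩
  have hd : ds[j.toNat]? = some t0 := by
    rcases hdrop : ds.drop j.toNat with _ | ⟨a, l'⟩
    · rw [hdrop] at hs; simp at hs
    · rw [hdrop] at hs
      rcases k : ((j + (((t0 :: ts).length : Nat) : Int)).toNat - j.toNat) with _ | k'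
      · rw [k] at hs; simp at hs
      · rw [k] at hs
        simp only [List.take_succ_cons, List.cons.injEq] at hs
        have : ds[j.toNat + 0]? = some a := by
          rw [← List.getElem?_drop, hdrop]; rfl
        simpa [hs.1] using this
  have hjlt : j.toNat < ds.length := by omega
  rw [PySem.List.pyGetD_eq_getElem ds "" hj0 (by simpa using hjn)]
  have : ds[j.toNat] = t0 := by
    have := List.getElem?_eq_getElem hjlt
    rw [hd] at this
    exact (Option.some.injEq _ _ ▸ this.symm)
  simp [this]

theorem aWhile_indic (I : List (Int × Int)) (n : Nat) (j L : Int)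
    (h0 : 0 ≤ j) (_hL : 0 ≤ L) (_hn : j + L ≤ (n : Int)) :
    aWhile ((PySem.List.pyRange 0 (n : Int) 1).map (indic I)) j (j + L - 1)
      = (PySem.List.pyRange 0 (n : Int) 1).map (indic (I ++ [(j, j + L)])) := by
  apply List.ext_getElem?
  intro i
  rw [aWhile_getElem? _ _ _ h0]
  simp only [List.getElem?_map, PySem.List.getElem?_pyRange_one, List.length_map,
    PySem.List.length_pyRange_one, Int.sub_zero, Int.toNat_natCast, Int.zero_add]
  by_cases hin : i < n
  · simp only [hin, if_pos, Option.map_some]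
    by_cases hw : j ≤ (i : Int) ∧ (i : Int) ≤ j + L - 1
    · rw [if_pos ⟨hw.1, hw.2, by simp⟩]
      have : indic (I ++ [(j, j + L)]) (i : Int) = 1 := by
        simp only [indic, List.any_append, List.any_cons, List.any_nil]
        rw [if_pos]
        simp only [Bool.or_eq_true, decide_eq_true_eq]
        right; left; constructor <;> omega
      rw [this]
    · rw [if_neg (by omega)]
      have hdec : ¬(j ≤ (i : Int) ∧ (i : Int) < j + L) := by omega
      have hd : ([(j, j + L)].any fun iv => decide (iv.1 ≤ (i : Int) ∧ (i : Int) < iv.2)) = false := by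
        simp
        omega
      simp only [indic]
      rw [List.any_append, hd, Bool.or_false]
  · rw [if_neg (by omega)]
    simp [hin]

theorem step_eq (ds : List String) (toks : List String) (I : List (Int × Int)) :
    aInner ds toks ((PySem.List.pyRange 0 (ds.length : Int) 1).map (indic I))
        (PySem.List.pyRange 0 (ds.length : Int) 1)
      = (PySem.List.pyRange 0 (ds.length : Int) 1).map (indic (
          match toks with
          | [] => I
          | t0 :: ts =>
            match bFind ds (t0 :: ts) ((bPos ds).getD t0 []) with
            | some iv => I ++ [iv]
            | none => I)) := by
  match toks with
  | [] =>
    rcases Nat.eq_zero_or_pos ds.length with h | h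
    · rw [h]
      rw [PySem.List.pyRange_one_eq_nil (by omega)]
      rfl
    · rw [PySem.List.pyRange_one_cons (by exact_mod_cast h)]
      simp only [aInner]
      rw [if_pos (by rw [PySem.List.slice_toNat ds (by omega) (by simp)]; simp)]
      rw [aWhile]
      norm_num
  | t0 :: ts =>
    have hred : (match t0 :: ts with
        | [] => I
        | t0 :: ts => match bFind ds (t0 :: ts) ((bPos ds).getD t0 []) with
          | some iv => I ++ [iv]
          | none => I)
      = match bFind ds (t0 :: ts) ((bPos ds).getD t0 []) with
          | some iv => I ++ [iv]
          | none => I := rfl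
    rw [hred, aInner_eq_find?, bFind_eq_find?, bPos_getD]
    rw [find?_filter_of_imp _ _ _ (by
      intro j hj hp
      rw [PySem.List.mem_pyRange_one] at hj
      exact (slice_match_facts ds t0 ts j hj.1 hj.2 (of_decide_eq_true hp)).2)]
    cases hf : (PySem.List.pyRange 0 (ds.length : Int) 1).find?
        (fun j => decide (PySem.List.slice ds (some j) (some (j + (((t0 :: ts).length : Nat) : Int))) = t0 :: ts)) with
    | none => simp
    | some j =>
      have hmem := List.mem_of_find?_eq_some hf
      rw [PySem.List.mem_pyRange_one] at hmem
      have hp0 := List.find?_some hf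
      have hp := of_decide_eq_true hp0
      have hfacts := slice_match_facts ds t0 ts j hmem.1 hmem.2 hp
      simp only [Option.map_some]
      have := aWhile_indic I ds.length j (((t0 :: ts).length : Nat) : Int)
        hmem.1 (by positivity) hfacts.1
      exact this

theorem fold_eq (ds : List String) (ops : List String) (I : List (Int × Int)) :
    ops.foldl (fun op_list op =>
        aInner ds (PySem.Str.split₀ (PySem.Str.lower op)) op_list
          (PySem.List.pyRange 0 (ds.length : Int) 1))
        ((PySem.List.pyRange 0 (ds.length : Int) 1).map (indic I))
      = (PySem.List.pyRange 0 (ds.length : Int) 1).map (indic (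
          ops.foldl (fun acc op =>
            match PySem.Str.split₀ (PySem.Str.lower op) with
            | [] => acc
            | t0 :: ts =>
              match bFind ds (t0 :: ts) ((bPos ds).getD t0 []) with
              | some iv => acc ++ [iv]
              | none => acc) I)) := by
  induction ops generalizing I with
  | nil => rfl
  | cons op rest ih =>
    simp only [List.foldl_cons]
    rw [step_eq ds (PySem.Str.split₀ (PySem.Str.lower op)) I]
    cases h : PySem.Str.split₀ (PySem.Str.lower op) with
    | nil => exact ih I
    | cons t0 ts =>
      cases bFind ds (t0 :: ts) ((bPos ds).getD t0 []) <;> exact ih _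

-- ===== VERDICT (by name: the statement is the Claim_ definition above) =====
theorem deal_operation_spec : Claim_equal_deal_operation := by
  intro deal_sent opList _
  unfold Spec_deal_operation deal_operation deal_operation_alt
  have hinit : (PySem.List.pyRange 0 (deal_sent.length : Int) 1).map (fun _ => (0 : Int))
      = (PySem.List.pyRange 0 (deal_sent.length : Int) 1).map (indic []) := by
    apply List.map_congr_left
    intro i _
    simp [indic]
  simp only []
  rw [hinit, fold_eq]
  rfl
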